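-- pv_equiv track=rewrite | github.com/mistrzegiptu/WDI | zestaw3/zad11.py | longestArithmetics
-- ===== SOURCE A (Python) =====
-- def longestArithmetics(T):
--     l = len(T)
--     longest = 0
--     counter = 0
--     q = 0
--     for i in range(l-1):
--         if counter == 0:
--             q = T[i+1]//T[i]
--         if T[i+1]//T[i] == q:
--             counter += 1
--         else:
--             if longest < counter:
--                 longest = counter
--
--             counter = 0
--
--     return max(longest, counter)+1
-- ===== SOURCE B (Python) =====
-- def longestArithmetics(T):
--     r = [T[i + 1] // T[i] for i in range(len(T) - 1)]
--     best = 0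
--     j = 0
--     while j < len(r):
--         q = r[j]
--         k = j + 1
--         while k < len(r) and r[k] == q:
--             k += 1
--         best = max(best, k - j)
--         j = k + 1
--     return best + 1
-- ===== Notes on version B (the rewrite author's own statement) =====
-- stated objective: alternative
-- what changed: Replaces A's single-pass three-variable state machine (longest/counter/q mutated per index) by precomputing the consecutive-ratio list and scanning it group-by-group with explicit indices, skipping the breaking element between groups.
import Mathlib
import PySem

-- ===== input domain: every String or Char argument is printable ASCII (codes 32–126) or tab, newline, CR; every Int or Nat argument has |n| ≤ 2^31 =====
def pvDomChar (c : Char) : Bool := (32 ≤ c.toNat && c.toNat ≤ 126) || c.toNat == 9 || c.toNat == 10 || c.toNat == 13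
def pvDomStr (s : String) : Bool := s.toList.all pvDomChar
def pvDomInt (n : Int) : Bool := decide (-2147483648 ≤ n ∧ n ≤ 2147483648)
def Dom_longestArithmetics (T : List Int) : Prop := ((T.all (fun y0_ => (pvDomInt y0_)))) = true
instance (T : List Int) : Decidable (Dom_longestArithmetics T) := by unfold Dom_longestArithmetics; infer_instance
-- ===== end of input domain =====

-- B replaces A's three-variable state machine (longest/counter/q) by a precomputed ratio
-- list scanned group-by-group with explicit indices (objective: alternative decomposition,
-- same cost); equivalence is proved for the return value only.

-- ===== PORT A =====
-- loop body of A, on the current ratio value x = T[i+1]//T[i]; state = (longest, counter, q)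
def pvStepA (st : Int × Int × Int) (x : Int) : Int × Int × Int :=
  let q := if st.2.1 = 0 then x else st.2.2
  if x = q then (st.1, st.2.1 + 1, q)
  else ((if st.1 < st.2.1 then st.2.1 else st.1), 0, q)

def longestArithmetics (T : List Int) : Int :=
  let s :=
    (PySem.List.pyRange 0 ((T.length : Int) - 1) 1).foldl
      (fun st i =>
        pvStepA st (PySem.Int.floordiv ((PySem.List.pyGet? T (i + 1)).getD 0)
                                       ((PySem.List.pyGet? T i).getD 0)))
      (0, 0, 0)
  max s.1 s.2.1 + 1

-- ===== PORT B =====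
-- r = [T[i+1] // T[i] for i in range(len(T) - 1)]
def pvRatios (T : List Int) : List Int :=
  (PySem.List.pyRange 0 ((T.length : Int) - 1) 1).map
    (fun i => PySem.Int.floordiv ((PySem.List.pyGet? T (i + 1)).getD 0)
                                 ((PySem.List.pyGet? T i).getD 0))

-- inner while loop: count the prefix of xs equal to q, return (count, remaining suffix)
def pvRunLen (q : Int) : List Int → Nat × List Int
  | [] => (0, [])
  | x :: xs => if x = q then
      let p := pvRunLen q xs
      (p.1 + 1, p.2)
    else (0, x :: xs)

theorem pvRunLen_len_le (q : Int) (xs : List Int) : (pvRunLen q xs).2.length ≤ xs.length := by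
  induction xs with
  | nil => simp [pvRunLen]
  | cons x xs ih =>
    simp only [pvRunLen]
    split
    · simpa using Nat.le_succ_of_le ih
    · simp

-- outer while loop: take a group, record its length, skip the breaking element
def pvScanB : List Int → Int → Int
  | [], best => best
  | q :: rest, best =>
      let p := pvRunLen q rest
      pvScanB p.2.tail (max best ((p.1 : Int) + 1))
termination_by r _ => r.length
decreasing_by
  have h := pvRunLen_len_le q rest
  have h2 : (pvRunLen q rest).2.tail.length ≤ (pvRunLen q rest).2.length := by
    cases (pvRunLen q rest).2 <;> simp
  simp only [List.length_cons]
  omega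

def longestArithmetics_alt (T : List Int) : Int := pvScanB (pvRatios T) 0 + 1

-- ===== PRECONDITION & SPEC =====
-- Pre_ excludes exactly the inputs on which Python raises ZeroDivisionError:
-- a zero anywhere except the last position (every non-last element is a divisor).
def Pre_longestArithmetics (T : List Int) : Prop := (0 : Int) ∉ T.dropLast
instance (T : List Int) : Decidable (Pre_longestArithmetics T) := by
  unfold Pre_longestArithmetics; infer_instance

def pvWitness_longestArithmetics : List Int := [1, 2, 4]

def Spec_longestArithmetics (T : List Int) (out : Int) : Prop := out = longestArithmetics_alt T
instance (T : List Int) (out : Int) : Decidable (Spec_longestArithmetics T out) := by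
  unfold Spec_longestArithmetics; infer_instance

-- ===== CLAIM (what is proved, stated in full; the proofs are below) =====
def Claim_equal_longestArithmetics : Prop := ∀ (T : List Int), Dom_longestArithmetics T → Pre_longestArithmetics T → Spec_longestArithmetics T (longestArithmetics T)

-- ===== LEMMAS AND PROOFS =====

-- A's answer (before the final +1) as a function of the ratio list and the loop state
def pvResA (r : List Int) (L c q : Int) : Int :=
  let s := r.foldl pvStepA (L, c, q)
  max s.1 s.2.1

theorem pvMax_ite (L c : Int) : (if L < c then c else L) = max L c := by
  split <;> omega

-- core invariant, fresh state (counter = 0) and mid-run state (counter ≥ 1) together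
theorem pvMain (n : Nat) : ∀ r : List Int, r.length ≤ n →
    (∀ L q : Int, 0 ≤ L → pvResA r L 0 q = pvScanB r L) ∧
    (∀ L c q : Int, 0 ≤ L → 1 ≤ c →
      pvResA r L c q = pvScanB (pvRunLen q r).2.tail (max L (c + (pvRunLen q r).1))) := by
  induction n with
  | zero =>
    intro r hr
    have : r = [] := List.eq_nil_of_length_eq_zero (Nat.le_zero.mp hr)
    subst this
    constructor
    · intro L q hL; simp [pvResA, pvScanB]; omega
    · intro L c q hL hc; simp [pvResA, pvRunLen, pvScanB]
  | succ n ih =>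
    intro r hr
    cases r with
    | nil =>
      constructor
      · intro L q hL; simp [pvResA, pvScanB]; omega
      · intro L c q hL hc; simp [pvResA, pvRunLen, pvScanB]
    | cons x xs =>
      have hxs : xs.length ≤ n := by simpa using Nat.lt_succ_iff.mp (Nat.lt_of_lt_of_le (by simp) hr)
      obtain ⟨ihF, ihM⟩ := ih xs hxs
      constructor
      · -- fresh: step sets q := x, matches, counter becomes 1
        intro L q hL
        have hstep : pvStepA (L, 0, q) x = (L, 1, x) := by simp [pvStepA]
        have h1 := ihM L 1 x hL le_rfl
        simp only [pvResA, List.foldl_cons, hstep] at *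
        rw [h1]
        show _ = pvScanB (x :: xs) L
        rw [pvScanB]
        congr 1
        omega
      · -- mid-run: counter ≥ 1
        intro L c q hL hc
        by_cases hx : x = q
        · have hstep : pvStepA (L, c, q) x = (L, c + 1, q) := by
            simp [pvStepA, hx]
          have h1 := ihM L (c + 1) q hL (by omega)
          simp only [pvResA, List.foldl_cons, hstep] at *
          rw [h1, pvRunLen, if_pos hx]
          congr 1
          push_cast
          omega
        · have hstep : pvStepA (L, c, q) x = (max L c, 0, q) := by
            have hc0 : ¬ c = 0 := by omega
            simp [pvStepA, hc0, hx, pvMax_ite]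
          have h1 := ihF (max L c) q (by omega)
          simp only [pvResA, List.foldl_cons, hstep] at *
          rw [h1, pvRunLen, if_neg hx]
          simp

-- ===== VERDICT (by name: the statement is the Claim_ definition above) =====
theorem longestArithmetics_spec : Claim_equal_longestArithmetics := by
  intro T _ _
  unfold Spec_longestArithmetics longestArithmetics longestArithmetics_alt
  have h := (pvMain (pvRatios T).length (pvRatios T) le_rfl).1 0 0 le_rfl
  simp only [pvResA] at h
  rw [← h]
  unfold pvRatios
  rw [List.foldl_map]
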